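-- pv_equiv track=rewrite | github.com/buildspacex-cell/sakhi | sakhi/apps/engine/micro_journey/sequencer.py | reorder_flows
-- ===== SOURCE A (Python) =====
-- from typing import Dict, List
--
-- LOW_EFFORT_KEYWORDS = {"clean", "water", "stretch", "check", "tidy"}
--
-- MID_EFFORT_KEYWORDS = {"review", "organize", "summarize"}
--
-- HIGH_EFFORT_KEYWORDS = {"plan", "write", "focus block"}
--
-- VERY_HIGH_EFFORT_KEYWORDS = {"deep work", "creative block"}
--
-- def compute_flow_effort(flow: Dict) -> int:
--     """Deterministic effort score based on text keywords."""
--     text_parts: List[str] = []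
--     for key in ("warmup_step", "focus_block_step", "closure_step", "optional_reward"):
--         val = flow.get(key)
--         if isinstance(val, str):
--             text_parts.append(val.lower())
--     text = " ".join(text_parts)
--     score = 1
--     if any(k in text for k in VERY_HIGH_EFFORT_KEYWORDS):
--         score = 4
--     elif any(k in text for k in HIGH_EFFORT_KEYWORDS):
--         score = 3
--     elif any(k in text for k in MID_EFFORT_KEYWORDS):
--         score = 2
--     elif any(k in text for k in LOW_EFFORT_KEYWORDS):
--         score = 1
--     return score
--
-- def reorder_flows(flows: List[Dict], rhythm_slot: str) -> List[Dict]: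
--     """Sort flows by effort with rhythm overrides; stable for equal effort."""
--     decorated = []
--     for idx, flow in enumerate(flows):
--         effort = compute_flow_effort(flow)
--         decorated.append((effort, idx, flow))
--
--     # base sort by effort then original index for stability
--     decorated.sort(key=lambda item: (item[0], item[1]))
--
--     reordered = [f for _, _, f in decorated]
--
--     if rhythm_slot in {"evening", "night"}:
--         heavy = [f for f in reordered if compute_flow_effort(f) >= 3]
--         light = [f for f in reordered if compute_flow_effort(f) < 3]
--         reordered = light + heavy
--     elif rhythm_slot == "morning":
--         planning_keywords = ("plan", "write", "organize")
--         planning_flows = []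
--         other_flows = []
--         for f in reordered:
--             text = " ".join([str(v).lower() for v in f.values() if isinstance(v, str)])
--             if any(k in text for k in planning_keywords):
--                 planning_flows.append(f)
--             else:
--                 other_flows.append(f)
--         reordered = planning_flows + other_flows
--
--     return reordered
-- ===== SOURCE B (Python) =====
-- LOW_EFFORT_KEYWORDS = {"clean", "water", "stretch", "check", "tidy"}
-- MID_EFFORT_KEYWORDS = {"review", "organize", "summarize"}
-- HIGH_EFFORT_KEYWORDS = {"plan", "write", "focus block"}
-- VERY_HIGH_EFFORT_KEYWORDS = {"deep work", "creative block"}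
--
--
-- def _effort(flow):
--     parts = []
--     for key in ("warmup_step", "focus_block_step", "closure_step", "optional_reward"):
--         val = flow.get(key)
--         if isinstance(val, str):
--             parts.append(val.lower())
--     text = " ".join(parts)
--     if any(k in text for k in VERY_HIGH_EFFORT_KEYWORDS):
--         return 4
--     if any(k in text for k in HIGH_EFFORT_KEYWORDS):
--         return 3
--     if any(k in text for k in MID_EFFORT_KEYWORDS):
--         return 2
--     return 1
--
--
-- def _is_planning(flow):
--     text = " ".join(str(v).lower() for v in flow.values() if isinstance(v, str))
--     return any(k in text for k in ("plan", "write", "organize"))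
--
--
-- def reorder_flows(flows, rhythm_slot):
--     # Bucket classification instead of sort: efforts are only 1..4, so emitting
--     # the buckets in order IS the stable effort sort; the evening/night
--     # light/heavy split of an effort-sorted list is a no-op, and the morning
--     # planning-first split is the (planning, effort) bucket order.
--     if rhythm_slot == "morning":
--         classes = [(p, e) for p in (True, False) for e in (1, 2, 3, 4)]
--         return [f for p, e in classes
--                 for f in flows if _is_planning(f) == p and _effort(f) == e]
--     return [f for e in (1, 2, 3, 4) for f in flows if _effort(f) == e]
-- ===== Notes on version B (the rewrite author's own statement) =====
-- stated objective: simpler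
-- what changed: Replaces decorate/comparison-sort/partition with direct bucket classification: since effort scores are only 1..4, B emits flows.filter(effort==e) for e in 1..4 (and, for morning, planning buckets first), with no sort and no post-hoc partitions.
import Mathlib
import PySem

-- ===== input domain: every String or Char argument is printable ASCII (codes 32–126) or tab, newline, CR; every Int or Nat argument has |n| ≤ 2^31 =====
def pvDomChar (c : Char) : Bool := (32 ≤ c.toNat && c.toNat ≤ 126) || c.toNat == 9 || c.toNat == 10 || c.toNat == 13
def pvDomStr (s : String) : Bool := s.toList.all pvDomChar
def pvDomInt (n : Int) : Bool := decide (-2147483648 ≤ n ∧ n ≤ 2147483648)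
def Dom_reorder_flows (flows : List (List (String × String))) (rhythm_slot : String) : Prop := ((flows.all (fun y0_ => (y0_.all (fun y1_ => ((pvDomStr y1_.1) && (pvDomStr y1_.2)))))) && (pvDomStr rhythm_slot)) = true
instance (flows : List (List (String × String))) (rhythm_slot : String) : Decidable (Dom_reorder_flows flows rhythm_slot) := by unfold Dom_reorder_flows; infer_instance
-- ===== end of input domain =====

-- B replaces A's decorate / comparison-sort / partition pipeline with direct bucket
-- classification over the four possible effort scores (simpler; same return values).

-- ===== PORT A =====
-- shared helpers: both Pythons compute keyword text / effort / the morning planning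
-- flag by the same code, so the helpers are ported once and used by both ports.
-- any(k in text for k in {...}) iterates a Python set, but 'any' is order-independent,
-- so it is ported as 'any' over a fixed list of the same keywords.
def pvKeywordAny (ks : List String) (text : String) : Bool :=
  ks.any (fun k => PySem.Str.isIn k text)

-- the " ".join of the lowered values of the four effort keys (isinstance(val, str)
-- is true exactly when the key is present, since all dict values here are strings)
def pvEffortText (flow : List (String × String)) : String :=
  let d := PySem.Dict.ofList flow
  let parts := (["warmup_step", "focus_block_step", "closure_step", "optional_reward"] : List String).foldl
      (fun acc k => match d.get? k with
        | some v => acc ++ [PySem.Str.lower v]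
        | none => acc) ([] : List String)
  PySem.Str.join " " parts

-- compute_flow_effort, A's shape (score = 1 initially; the LOW branch re-assigns 1)
def compute_flow_effort (flow : List (String × String)) : Int :=
  let text := pvEffortText flow
  let score : Int := 1
  if pvKeywordAny ["deep work", "creative block"] text then 4
  else if pvKeywordAny ["plan", "write", "focus block"] text then 3
  else if pvKeywordAny ["review", "organize", "summarize"] text then 2
  else if pvKeywordAny ["clean", "water", "stretch", "check", "tidy"] text then 1
  else score

-- morning planning flag: " ".join(str(v).lower() for v in f.values() if isinstance(v, str))
-- — every value is a str, so str(v) = v and the isinstance test always holds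
def pvIsPlanning (flow : List (String × String)) : Bool :=
  pvKeywordAny ["plan", "write", "organize"]
    (PySem.Str.join " " (((PySem.Dict.ofList flow).values).map PySem.Str.lower))

def reorder_flows (flows : List (List (String × String))) (rhythm_slot : String) : List (List (String × String)) :=
  let decorated : List (Int × Int × List (String × String)) :=
    (PySem.List.enumerate flows).foldl
      (fun acc p => acc ++ [(compute_flow_effort p.2, p.1, p.2)]) []
  let decorated := PySem.List.sorted2 decorated (fun t => t.1) (fun t => t.2.1)
  let reordered := decorated.map (fun t => t.2.2)
  if rhythm_slot == "evening" || rhythm_slot == "night" then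
    let heavy := reordered.filter (fun f => decide (3 ≤ compute_flow_effort f))
    let light := reordered.filter (fun f => decide (compute_flow_effort f < 3))
    light ++ heavy
  else if rhythm_slot == "morning" then
    let pr := reordered.foldl
      (fun (acc : List (List (String × String)) × List (List (String × String))) f =>
        if pvIsPlanning f then (acc.1 ++ [f], acc.2) else (acc.1, acc.2 ++ [f]))
      ([], [])
    pr.1 ++ pr.2
  else
    reordered

-- ===== PORT B =====
-- Source B's _effort (same branches as A's helper, but returns directly; no LOW branch)
def pvEffortB (flow : List (String × String)) : Int :=
  let text := pvEffortText flow
  if pvKeywordAny ["deep work", "creative block"] text then 4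
  else if pvKeywordAny ["plan", "write", "focus block"] text then 3
  else if pvKeywordAny ["review", "organize", "summarize"] text then 2
  else 1

def reorder_flows_alt (flows : List (List (String × String))) (rhythm_slot : String) : List (List (String × String)) :=
  if rhythm_slot == "morning" then
    ([(true, (1 : Int)), (true, 2), (true, 3), (true, 4),
      (false, 1), (false, 2), (false, 3), (false, 4)] : List (Bool × Int)).flatMap
      (fun c => flows.filter (fun f => pvIsPlanning f == c.1 && pvEffortB f == c.2))
  else
    ([1, 2, 3, 4] : List Int).flatMap
      (fun e => flows.filter (fun f => pvEffortB f == e))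

-- ===== PRECONDITION & SPEC =====
def Spec_reorder_flows (flows : List (List (String × String))) (rhythm_slot : String) (out : List (List (String × String))) : Prop := out = reorder_flows_alt flows rhythm_slot
instance (flows : List (List (String × String))) (rhythm_slot : String) (out : List (List (String × String))) : Decidable (Spec_reorder_flows flows rhythm_slot out) := by unfold Spec_reorder_flows; infer_instance

-- ===== CLAIM (what is proved, stated in full; the proofs are below) =====
def Claim_equal_reorder_flows : Prop := ∀ (flows : List (List (String × String))) (rhythm_slot : String), Dom_reorder_flows flows rhythm_slot → Spec_reorder_flows flows rhythm_slot (reorder_flows flows rhythm_slot)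

-- ===== LEMMAS AND PROOFS =====

-- the two effort helpers agree
theorem effort_eq (f : List (String × String)) : compute_flow_effort f = pvEffortB f := by
  unfold compute_flow_effort pvEffortB
  dsimp only
  split_ifs <;> rfl

-- effort is always one of 1,2,3,4
theorem effort_mem (f : List (String × String)) : pvEffortB f ∈ ([1, 2, 3, 4] : List Int) := by
  unfold pvEffortB
  dsimp only
  split_ifs <;> simp

-- sorted2 is sorted under the lexicographic pair key
theorem sorted2_eq_sorted_lex {α : Type} (xs : List α) (k1 k2 : α → Int) :
    PySem.List.sorted2 xs k1 k2 false =
      PySem.List.sorted xs (fun x => toLex (k1 x, k2 x)) false := by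
  unfold PySem.List.sorted2 PySem.List.sorted
  dsimp only
  have hbf : (fun a b => decide (k1 a < k1 b) || (!decide (k1 b < k1 a) && decide (k2 a < k2 b)))
      = (fun a b => decide (toLex (k1 a, k2 a) < toLex (k1 b, k2 b))) := by
    funext a b
    by_cases h1 : k1 a < k1 b <;> by_cases h2 : k1 b < k1 a <;> by_cases h3 : k2 a < k2 b <;>
      simp [h1, h2, h3, Prod.Lex.toLex_lt_toLex] <;> omega
  simp [hbf]

-- one element joins exactly its own key-class
theorem flatMap_cons_perm {α κ : Type} [DecidableEq κ] (key : α → κ) (vs : List κ)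
    (x : α) (l : List α) (hx : key x ∈ vs) (hnd : vs.Nodup) :
    (vs.flatMap (fun v => (x :: l).filter (fun y => key y == v))).Perm
      (x :: vs.flatMap (fun v => l.filter (fun y => key y == v))) := by
  induction vs with
  | nil => cases hx
  | cons v vs ih =>
    simp only [List.flatMap_cons]
    by_cases hv : key x = v
    · have h1 : (x :: l).filter (fun y => key y == v) = x :: l.filter (fun y => key y == v) := by
        simp [hv]
      have hnv : v ∉ vs := (List.nodup_cons.mp hnd).1
      have h2 : vs.flatMap (fun w => (x :: l).filter (fun y => key y == w))
          = vs.flatMap (fun w => l.filter (fun y => key y == w)) := by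
        apply List.flatMap_congr
        intro w hw
        have : key x ≠ w := by rintro rfl; exact hnv (hv ▸ hw)
        simp [this]
      rw [h1, h2]
      simp
    · have h1 : (x :: l).filter (fun y => key y == v) = l.filter (fun y => key y == v) := by
        simp [hv]
      have hx' : key x ∈ vs := by
        rcases List.mem_cons.mp hx with h | h
        · exact absurd h hv
        · exact h
      rw [h1]
      exact (List.Perm.append_left _ (ih hx' (List.nodup_cons.mp hnd).2)).trans List.perm_middle

-- concatenating the key-classes of l (keys drawn from a nodup list vs) is a permutation of l
theorem flatMap_filter_perm {α κ : Type} [DecidableEq κ] (key : α → κ) (vs : List κ)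
    (l : List α) (h : ∀ x ∈ l, key x ∈ vs) (hnd : vs.Nodup) :
    (vs.flatMap (fun v => l.filter (fun x => key x == v))).Perm l := by
  induction l with
  | nil => simp
  | cons x t ih =>
    exact ((flatMap_cons_perm key vs x t (h x (List.mem_cons_self)) hnd).trans
      ((ih (fun y hy => h y (List.mem_cons_of_mem _ hy))).cons x))

-- the filtered enumerate projects back to a plain filter
theorem enumerate_filter_snd {α : Type} (q : α → Bool) (l : List α) (s : Int) :
    ((PySem.List.enumerate l s).filter (fun p => q p.2)).map (fun p => p.2) = l.filter q := by
  induction l generalizing s with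
  | nil => simp [PySem.List.enumerate_nil]
  | cons x t ih =>
    rw [PySem.List.enumerate_cons, List.filter_cons]
    by_cases hq : q x <;> simp [hq, ih]

-- classes listed in increasing key order, each in l's (second-key-increasing) order, are lex-sorted
theorem pairwise_flatMap_filter {α : Type} (k1 k2 : α → Int) (vs : List Int) (l : List α)
    (hvs : vs.Pairwise (· < ·)) (hl : l.Pairwise (fun a b => k2 a < k2 b)) :
    (vs.flatMap (fun v => l.filter (fun x => k1 x == v))).Pairwise
      (fun a b => toLex (k1 a, k2 a) < toLex (k1 b, k2 b)) := by
  induction vs with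
  | nil => simp
  | cons v vs ih =>
    simp only [List.flatMap_cons]
    rw [List.pairwise_append]
    refine ⟨?_, ih (List.pairwise_cons.mp hvs).2 , ?_⟩
    · refine List.Pairwise.imp_of_mem ?_ (hl.filter (fun x => k1 x == v))
      intro a b ha hb hab
      have ha1 : k1 a = v := by simpa using (List.mem_filter.mp ha).2
      have hb1 : k1 b = v := by simpa using (List.mem_filter.mp hb).2
      rw [Prod.Lex.toLex_lt_toLex]
      exact Or.inr ⟨ha1.trans hb1.symm, hab⟩
    · intro a ha b hb
      have ha1 : k1 a = v := by simpa using (List.mem_filter.mp ha).2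
      obtain ⟨w, hw, hbw⟩ := List.mem_flatMap.mp hb
      have hb1 : k1 b = w := by simpa using (List.mem_filter.mp hbw).2
      rw [Prod.Lex.toLex_lt_toLex]
      exact Or.inl (by rw [ha1, hb1]; exact (List.pairwise_cons.mp hvs).1 w hw)

-- one effort bucket of the decorated list projects to a plain effort filter of flows
theorem bucket_map (flows : List (List (String × String))) (e : Int) :
    ((((PySem.List.enumerate flows).map
          (fun p => (compute_flow_effort p.2, p.1, p.2))).filter (fun t => t.1 == e)).map
        (fun t => t.2.2))
      = flows.filter (fun f => pvEffortB f == e) := by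
  rw [List.filter_map, List.map_map]
  have : ((fun (t : Int × Int × List (String × String)) => t.2.2) ∘
      (fun (p : Int × List (String × String)) => (compute_flow_effort p.2, p.1, p.2)))
      = fun p => p.2 := rfl
  rw [this]
  have : ((fun (t : Int × Int × List (String × String)) => t.1 == e) ∘
      (fun (p : Int × List (String × String)) => (compute_flow_effort p.2, p.1, p.2)))
      = fun p => pvEffortB p.2 == e := by
    funext p; simp [effort_eq]
  rw [this]
  exact enumerate_filter_snd (fun f => pvEffortB f == e) flows 0

-- the heart: A's sorted+projected list is B's effort-bucket concatenation
theorem reordered_eq_buckets (flows : List (List (String × String))) :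
    (PySem.List.sorted2
        ((PySem.List.enumerate flows).foldl
          (fun acc p => acc ++ [(compute_flow_effort p.2, p.1, p.2)]) [])
        (fun t => t.1) (fun t => t.2.1) false).map (fun t => t.2.2) =
      ([1, 2, 3, 4] : List Int).flatMap (fun e => flows.filter (fun f => pvEffortB f == e)) := by
  rw [PySem.List.foldl_append_singleton_eq_map, List.nil_append, sorted2_eq_sorted_lex]
  rw [PySem.List.sorted_eq_of_perm_of_pairwise_lt _
    (([1, 2, 3, 4] : List Int).flatMap
      (fun e => ((PySem.List.enumerate flows).map
        (fun p => (compute_flow_effort p.2, p.1, p.2))).filter (fun t => t.1 == e)))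
    (fun t => toLex (t.1, t.2.1)) ?_ ?_]
  · rw [List.map_flatMap]
    exact List.flatMap_congr (fun e _ => bucket_map flows e)
  · apply flatMap_filter_perm
    · intro t ht
      obtain ⟨p, hp, rfl⟩ := List.mem_map.mp ht
      show compute_flow_effort p.2 ∈ _
      rw [effort_eq]
      exact effort_mem _
    · decide
  · exact pairwise_flatMap_filter
      (fun (t : Int × Int × List (String × String)) => t.1) (fun t => t.2.1) [1, 2, 3, 4] _
      (by decide) ((PySem.List.pairwise_lt_enumerate flows 0).map _ (fun _ _ h => h))

-- an effort bucket is untouched (or emptied) by any test on the effort score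
theorem filter_bucket (flows : List (List (String × String))) (q : Int → Bool) (e : Int) :
    (flows.filter (fun f => pvEffortB f == e)).filter (fun f => q (compute_flow_effort f))
      = if q e then flows.filter (fun f => pvEffortB f == e) else [] := by
  have hkey : ∀ x ∈ flows.filter (fun f => pvEffortB f == e), compute_flow_effort x = e := by
    intro x hx
    rw [effort_eq]
    simpa using (List.mem_filter.mp hx).2
  by_cases hq : q e
  · rw [if_pos hq]
    apply List.filter_eq_self.mpr
    intro x hx
    rw [hkey x hx]
    exact hq
  · rw [if_neg hq]
    apply List.filter_eq_nil_iff.mpr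
    intro x hx h
    rw [hkey x hx] at h
    exact hq h

-- A's morning loop is the stable planning/other partition
theorem partition_fold (l : List (List (String × String))) :
    l.foldl (fun (acc : List (List (String × String)) × List (List (String × String))) f =>
        if pvIsPlanning f then (acc.1 ++ [f], acc.2) else (acc.1, acc.2 ++ [f])) ([], [])
      = (l.filter pvIsPlanning, l.filter (fun f => !pvIsPlanning f)) := by
  have hbody : (fun (acc : List (List (String × String)) × List (List (String × String))) f =>
        if pvIsPlanning f then (acc.1 ++ [f], acc.2) else (acc.1, acc.2 ++ [f]))
      = (fun acc f => ((if pvIsPlanning f then acc.1 ++ [f] else acc.1),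
          (if pvIsPlanning f then acc.2 else acc.2 ++ [f]))) := by
    funext acc f
    by_cases h : pvIsPlanning f <;> simp [h]
  rw [hbody, PySem.List.foldl_prod_mk
    (f := fun acc e => if pvIsPlanning e then acc ++ [e] else acc)
    (g := fun acc e => if pvIsPlanning e then acc else acc ++ [e])]
  have hsnd : (fun (acc : List (List (String × String))) f =>
        if pvIsPlanning f then acc else acc ++ [f])
      = (fun acc f => if !pvIsPlanning f then acc ++ [f] else acc) := by
    funext acc f
    by_cases h : pvIsPlanning f <;> simp [h]
  rw [hsnd, PySem.List.foldl_append_if_eq_filter, PySem.List.foldl_append_if_eq_filter,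
    List.nil_append, List.nil_append]

-- ===== VERDICT (by name: the statement is the Claim_ definition above) =====
theorem reorder_flows_spec : Claim_equal_reorder_flows := by
  intro flows slot _
  show reorder_flows flows slot = reorder_flows_alt flows slot
  unfold reorder_flows reorder_flows_alt
  dsimp only
  rw [reordered_eq_buckets]
  by_cases h1 : (slot == "evening" || slot == "night") = true
  · have hm : (slot == "morning") = false := by
      have h1' : slot = "evening" ∨ slot = "night" := by simpa using h1
      rcases h1' with h | h <;> (subst h; decide)
    rw [if_pos h1, hm, if_neg (by simp)]
    simp only [List.flatMap_cons, List.flatMap_nil, List.append_nil, List.filter_append]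
    rw [show (fun f => decide (3 ≤ compute_flow_effort f))
          = (fun f => (fun z => decide (3 ≤ z)) (compute_flow_effort f)) from rfl,
        show (fun f => decide (compute_flow_effort f < 3))
          = (fun f => (fun z => decide (z < 3)) (compute_flow_effort f)) from rfl]
    rw [filter_bucket flows (fun z => decide (z < 3)) 1, filter_bucket flows (fun z => decide (z < 3)) 2,
        filter_bucket flows (fun z => decide (z < 3)) 3, filter_bucket flows (fun z => decide (z < 3)) 4,
        filter_bucket flows (fun z => decide (3 ≤ z)) 1, filter_bucket flows (fun z => decide (3 ≤ z)) 2,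
        filter_bucket flows (fun z => decide (3 ≤ z)) 3, filter_bucket flows (fun z => decide (3 ≤ z)) 4]
    norm_num
  · rw [if_neg h1]
    by_cases h2 : (slot == "morning") = true
    · rw [if_pos h2, if_pos h2, partition_fold]
      simp [List.filter_filter, List.append_assoc]
    · rw [if_neg h2, if_neg h2]
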